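-- pv_equiv track=rewrite | github.com/pokerdio/generic | cf/cf-1665b.py | go
-- ===== SOURCE A (Python) =====
-- def go(n, m):
--     ret = 0
--     while n > m:
--         ret += 1   # duplication
--         swaps = min(m, n - m)
--         ret += swaps
--         m += swaps
--     return ret
-- ===== SOURCE B (Python) =====
-- def go(n, m):
--     if n <= m:
--         return 0
--     # swaps always total n - m; duplications = halvings of n (ceil) until it fits under m
--     def dups(k):
--         return 0 if k <= m else 1 + dups((k + 1) // 2)
--     return (n - m) + dups(n)
-- ===== Notes on version B (the rewrite author's own statement) =====
-- stated objective: alternative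
-- what changed: B replaces A's state-mutating loop (which grows m and accumulates min-based swap counts) with a closed-form swap total (n - m) plus a recursion that halves n (ceiling) to count the duplications, never touching m or computing min.
import Mathlib
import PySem

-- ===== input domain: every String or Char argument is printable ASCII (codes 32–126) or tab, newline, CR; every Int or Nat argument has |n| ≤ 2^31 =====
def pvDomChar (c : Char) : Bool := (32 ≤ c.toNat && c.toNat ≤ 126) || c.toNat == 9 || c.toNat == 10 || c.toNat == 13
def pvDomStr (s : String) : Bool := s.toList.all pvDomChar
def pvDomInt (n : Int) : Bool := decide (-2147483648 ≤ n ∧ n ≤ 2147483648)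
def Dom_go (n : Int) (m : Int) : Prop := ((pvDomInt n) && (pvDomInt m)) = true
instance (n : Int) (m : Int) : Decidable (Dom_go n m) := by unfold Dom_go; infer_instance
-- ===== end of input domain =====

-- B replaces A's state-mutating min/swap loop with a closed-form swap total (n - m)
-- plus a ceiling-halving recursion on n that counts the duplications; same cost.
-- Pre_go excludes m ≤ 0 < n, where A's loop never terminates (and B's recursion likewise diverges).


-- ===== PORT A =====
-- A's while-loop; the guard's extra '1 ≤ m' conjunct only makes the recursion total
-- (for m ≤ 0 < n the Python loop diverges; those inputs are outside Pre_go).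
def goLoop (n m ret : Int) : Int :=
  if _h : n > m ∧ 1 ≤ m then
    goLoop n (m + min m (n - m)) (ret + 1 + min m (n - m))
  else ret
termination_by (n - m).toNat
decreasing_by omega

def go (n : Int) (m : Int) : Int := goLoop n m 0

-- ===== PORT B =====
-- B's helper dups(k): halve k (ceiling, Python //) until it is ≤ m; the guard's
-- extra '1 ≤ m' conjunct only makes the recursion total (outside Pre_go B diverges too).
def dups (m k : Int) : Int :=
  if _h : m < k ∧ 1 ≤ m then 1 + dups m (PySem.Int.floordiv (k + 1) 2) else 0
termination_by k.toNat
decreasing_by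
  rw [PySem.Int.floordiv_eq_ediv_of_pos (by omega)]; omega

def go_alt (n : Int) (m : Int) : Int :=
  if n ≤ m then 0 else (n - m) + dups m n

-- ===== PRECONDITION & SPEC =====
-- Pre_go excludes exactly m ≤ 0 < n, where Python A loops forever (swaps ≤ 0, m never reaches n).
def Pre_go (n : Int) (m : Int) : Prop := 1 ≤ m ∨ n ≤ m
instance (n : Int) (m : Int) : Decidable (Pre_go n m) := by unfold Pre_go; infer_instance
def pvWitness_go : Int × Int := (10, 3)

def Spec_go (n : Int) (m : Int) (out : Int) : Prop := out = go_alt n m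
instance (n : Int) (m : Int) (out : Int) : Decidable (Spec_go n m out) := by unfold Spec_go; infer_instance

-- ===== CLAIM (what is proved, stated in full; the proofs are below) =====
def Claim_equal_go : Prop := ∀ (n : Int) (m : Int), Dom_go n m → Pre_go n m → Spec_go n m (go n m)

-- ===== LEMMAS AND PROOFS =====

-- ceiling-halving n once corresponds to doubling the bound m once
theorem dups_double (m n : Int) (hm : 1 ≤ m) (hn : m < n) :
    dups m n = 1 + dups (2 * m) n := by
  rw [dups, dif_pos ⟨hn, hm⟩]
  have hpos : (0:Int) < 2 := by omega
  have hhalf : PySem.Int.floordiv (n + 1) 2 = (n + 1) / 2 :=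
    PySem.Int.floordiv_eq_ediv_of_pos hpos
  have hn2 : (2:Int) ≤ n := by omega
  have hb : 2 * ((n + 1) / 2) - 1 ≤ n ∧ n ≤ 2 * ((n + 1) / 2) := by omega
  by_cases h2 : n ≤ 2 * m
  · -- last duplication: after one halving k ≤ m, and dups (2*m) n = 0
    rw [hhalf, dups, dif_neg (by omega), dups, dif_neg (by omega)]
  · -- still above: recurse on the halved value
    have hrec : dups m ((n + 1) / 2) = 1 + dups (2 * m) ((n + 1) / 2) :=
      dups_double m ((n + 1) / 2) hm (by omega)
    have hR : dups (2 * m) n = 1 + dups (2 * m) ((n + 1) / 2) := by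
      rw [dups, dif_pos (show 2 * m < n ∧ 1 ≤ 2 * m from by omega), hhalf]
    rw [hhalf, hrec, hR]
termination_by n.toNat
decreasing_by omega

-- main invariant: A's loop = accumulator + remaining swap total + B's duplication count
theorem goLoop_eq (n m ret : Int) (hm : 1 ≤ m) :
    goLoop n m ret = ret + max (n - m) 0 + dups m n := by
  by_cases h : n > m
  · rw [goLoop, dif_pos ⟨h, hm⟩]
    by_cases h2 : 2 * m < n
    · have hmin : min m (n - m) = m := by omega
      rw [hmin, goLoop_eq n (m + m) (ret + 1 + m) (by omega),
          dups_double m n hm h, show m + m = 2 * m from by ring]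
      omega
    · have hmin : min m (n - m) = n - m := by omega
      rw [hmin, goLoop, dif_neg (show ¬ (n > m + (n - m) ∧ 1 ≤ m + (n - m)) from by omega),
          dups, dif_pos ⟨h, hm⟩,
          PySem.Int.floordiv_eq_ediv_of_pos (show (0:Int) < 2 from by omega),
          dups, dif_neg (show ¬ (m < (n + 1) / 2 ∧ 1 ≤ m) from by omega)]
      omega
  · rw [goLoop, dif_neg (show ¬ (n > m ∧ 1 ≤ m) from by omega),
        dups, dif_neg (show ¬ (m < n ∧ 1 ≤ m) from by omega)]
    omega
termination_by (n - m).toNat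
decreasing_by all_goals omega

-- ===== VERDICT (by name: the statement is the Claim_ definition above) =====
theorem go_spec : Claim_equal_go := by
  intro n m _ hpre
  unfold Spec_go go go_alt
  rcases hpre with hm | hnm
  · rw [goLoop_eq n m 0 hm]
    by_cases h : n ≤ m
    · rw [if_pos h, dups, dif_neg (show ¬ (m < n ∧ 1 ≤ m) from by omega)]
      omega
    · rw [if_neg h]
      omega
  · rw [goLoop, dif_neg (show ¬ (n > m ∧ 1 ≤ m) from by omega), if_pos hnm]
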